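-- pv_equiv track=rewrite | github.com/Ryan-Reese/ailsi_iKraph | relation/data_processing/gen_data.py | check_overlapping
-- ===== SOURCE A (Python) =====
-- def check_overlapping(appearance_a, appearance_b):
--     assert len(appearance_a) == len(appearance_b)
--     has_a_true_b_false = False
--     has_a_false_b_true = False
--     has_a_true_b_true = False
--
--     for bool_a, bool_b in zip(appearance_a, appearance_b):
--         if bool_a == True and bool_b == False: has_a_true_b_false = True
--         if bool_b == True and bool_a == False: has_a_false_b_true = True
--         if bool_a == True and bool_b == True: has_a_true_b_true = True
--
--     if not has_a_true_b_true: return "No Overlapping"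
--     if has_a_true_b_true and has_a_false_b_true and not has_a_true_b_false: return "A subset of B"
--     if has_a_true_b_true and has_a_true_b_false and not has_a_false_b_true: return "A superset of B"
--     if has_a_true_b_true and has_a_true_b_false and has_a_false_b_true: return "Partial Overlapping"
--     raise ValueError
-- ===== SOURCE B (Python) =====
-- def check_overlapping(appearance_a, appearance_b):
--     assert len(appearance_a) == len(appearance_b)
--     idx_a = {i for i, x in enumerate(appearance_a) if x}
--     idx_b = {i for i, x in enumerate(appearance_b) if x}
--     if not (idx_a & idx_b): return "No Overlapping"
--     if idx_a < idx_b: return "A subset of B"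
--     if idx_a > idx_b: return "A superset of B"
--     if idx_a != idx_b: return "Partial Overlapping"
--     raise ValueError
-- ===== Notes on version B (the rewrite author's own statement) =====
-- stated objective: alternative
-- what changed: Instead of a single pass maintaining three pair-type flags, B builds the two sets of indices where each list is True and classifies by set-order relations: disjoint intersection, proper subset (<), proper superset (>), inequality.
import Mathlib
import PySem

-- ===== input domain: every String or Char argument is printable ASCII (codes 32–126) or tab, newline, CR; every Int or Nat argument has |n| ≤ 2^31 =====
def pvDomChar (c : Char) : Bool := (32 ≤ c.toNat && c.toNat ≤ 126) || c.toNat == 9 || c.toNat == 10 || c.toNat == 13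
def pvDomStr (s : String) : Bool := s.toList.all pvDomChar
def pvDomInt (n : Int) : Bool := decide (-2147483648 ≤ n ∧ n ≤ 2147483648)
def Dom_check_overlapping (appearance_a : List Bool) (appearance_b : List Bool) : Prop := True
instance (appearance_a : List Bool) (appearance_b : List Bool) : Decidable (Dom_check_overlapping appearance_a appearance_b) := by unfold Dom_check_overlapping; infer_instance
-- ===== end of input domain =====

-- B re-represents each list as the SET OF INDICES where it is True and classifies by
-- set-order relations (disjointness, proper subset/superset, incomparability) instead of
-- A's per-pair flag loop; alternative data representation, same cost.
-- Both Pythons raise (AssertionError / ValueError) outside Pre_; the ports return "" there.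

-- ===== PORT A =====
def check_overlapping (appearance_a : List Bool) (appearance_b : List Bool) : String :=
  let st := (appearance_a.zip appearance_b).foldl
    (fun (s : Bool × Bool × Bool) p =>
      ( s.1 || (p.1 == true && p.2 == false),
        s.2.1 || (p.2 == true && p.1 == false),
        s.2.2 || (p.1 == true && p.2 == true))) (false, false, false)
  let has_a_true_b_false := st.1
  let has_a_false_b_true := st.2.1
  let has_a_true_b_true := st.2.2
  if !has_a_true_b_true then "No Overlapping"
  else if has_a_true_b_true && has_a_false_b_true && !has_a_true_b_false then "A subset of B"
  else if has_a_true_b_true && has_a_true_b_false && !has_a_false_b_true then "A superset of B"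
  else if has_a_true_b_true && has_a_true_b_false && has_a_false_b_true then "Partial Overlapping"
  else ""  -- Python: raise ValueError (excluded by Pre_)

-- ===== PORT B =====
-- {i for i, x in enumerate(l) if x}
def pvTrueIdx (l : List Bool) : PySem.Set Int :=
  PySem.Set.ofList (((PySem.List.enumerate l).filter (fun p => p.2)).map (fun p => p.1))

def check_overlapping_alt (appearance_a : List Bool) (appearance_b : List Bool) : String :=
  let idx_a := pvTrueIdx appearance_a
  let idx_b := pvTrueIdx appearance_b
  if (PySem.Set.inter idx_a idx_b).isEmpty then "No Overlapping"          -- not (idx_a & idx_b)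
  else if PySem.Set.issubset idx_a idx_b && !PySem.Set.equal idx_a idx_b  -- idx_a < idx_b
    then "A subset of B"
  else if PySem.Set.issuperset idx_a idx_b && !PySem.Set.equal idx_a idx_b -- idx_a > idx_b
    then "A superset of B"
  else if !PySem.Set.equal idx_a idx_b then "Partial Overlapping"          -- idx_a != idx_b
  else ""  -- Python: raise ValueError (excluded by Pre_)

-- ===== PRECONDITION & SPEC =====
-- Pre_ excludes exactly the inputs where both Pythons raise: unequal lengths (AssertionError)
-- and the case where (True,True) occurs but neither (True,False) nor (False,True) does (ValueError).
def Pre_check_overlapping (appearance_a : List Bool) (appearance_b : List Bool) : Prop :=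
  appearance_a.length = appearance_b.length ∧
  ((true, true) ∈ appearance_a.zip appearance_b →
    (true, false) ∈ appearance_a.zip appearance_b ∨ (false, true) ∈ appearance_a.zip appearance_b)
instance (appearance_a : List Bool) (appearance_b : List Bool) : Decidable (Pre_check_overlapping appearance_a appearance_b) := by unfold Pre_check_overlapping; infer_instance
def pvWitness_check_overlapping : List Bool × List Bool := ([true, true, false], [true, false, true])
def Spec_check_overlapping (appearance_a : List Bool) (appearance_b : List Bool) (out : String) : Prop := out = check_overlapping_alt appearance_a appearance_b
instance (appearance_a : List Bool) (appearance_b : List Bool) (out : String) : Decidable (Spec_check_overlapping appearance_a appearance_b out) := by unfold Spec_check_overlapping; infer_instance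

-- ===== CLAIM (what is proved, stated in full; the proofs are below) =====
def Claim_equal_check_overlapping : Prop := ∀ (appearance_a : List Bool) (appearance_b : List Bool), Dom_check_overlapping appearance_a appearance_b → Pre_check_overlapping appearance_a appearance_b → Spec_check_overlapping appearance_a appearance_b (check_overlapping appearance_a appearance_b)

-- ===== LEMMAS AND PROOFS =====

-- A's flag-accumulating fold computes exactly the three pair-membership facts.
theorem fold_flags (l : List (Bool × Bool)) (x y z : Bool) :
    l.foldl (fun (s : Bool × Bool × Bool) p =>
      ( s.1 || (p.1 == true && p.2 == false),
        s.2.1 || (p.2 == true && p.1 == false),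
        s.2.2 || (p.1 == true && p.2 == true))) (x, y, z)
    = (x || decide ((true, false) ∈ l), y || decide ((false, true) ∈ l), z || decide ((true, true) ∈ l)) := by
  induction l generalizing x y z with
  | nil => simp
  | cons p t ih =>
    obtain ⟨a, b⟩ := p
    simp only [List.foldl_cons, ih, List.mem_cons]
    cases a <;> cases b <;> simp

-- membership in zip = pointwise getElem? facts
theorem mem_zip_iff (a b : List Bool) (x y : Bool) :
    (x, y) ∈ a.zip b ↔ ∃ k : Nat, a[k]? = some x ∧ b[k]? = some y := by
  induction a generalizing b with
  | nil => simp
  | cons p t ih =>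
    cases b with
    | nil => simp
    | cons q u =>
      simp only [List.zip_cons_cons, List.mem_cons, ih, Prod.mk.injEq]
      constructor
      · rintro (⟨rfl, rfl⟩ | ⟨k, hk⟩)
        · exact ⟨0, by simp⟩
        · exact ⟨k + 1, by simpa using hk⟩
      · rintro ⟨k, hk⟩
        cases k with
        | zero => left; simpa [eq_comm] using hk
        | succ k => right; exact ⟨k, by simpa using hk⟩

-- membership in the index set of True positions
theorem mem_trueIdx (l : List Bool) (i : Int) :
    i ∈ pvTrueIdx l ↔ ∃ k : Nat, i = (k : Int) ∧ l[k]? = some true := by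
  unfold pvTrueIdx
  rw [PySem.Set.mem_ofList]
  simp only [List.mem_map, List.mem_filter, PySem.List.mem_enumerate_iff]
  constructor
  · rintro ⟨p, ⟨⟨k, hk, rfl⟩, hp⟩, rfl⟩
    refine ⟨k, by simp, List.getElem?_eq_some_iff.mpr ⟨hk, by simpa using hp⟩⟩
  · rintro ⟨k, rfl, hk⟩
    obtain ⟨hlt, hv⟩ := List.getElem?_eq_some_iff.mp hk
    exact ⟨((k : Int), true), ⟨⟨k, hlt, by simp [hv]⟩, by simp⟩, rfl⟩

theorem tt_iff (a b : List Bool) :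
    (true, true) ∈ a.zip b ↔ ∃ i, i ∈ pvTrueIdx a ∧ i ∈ pvTrueIdx b := by
  simp only [mem_zip_iff, mem_trueIdx]
  constructor
  · rintro ⟨k, h1, h2⟩; exact ⟨(k : Int), ⟨k, rfl, h1⟩, ⟨k, rfl, h2⟩⟩
  · rintro ⟨i, ⟨k, rfl, h1⟩, ⟨k', hk', h2⟩⟩
    exact ⟨k, h1, by rwa [show k' = k by exact_mod_cast hk'.symm] at h2⟩

theorem tf_iff (a b : List Bool) (h : a.length = b.length) :
    (true, false) ∈ a.zip b ↔ ¬ (∀ i ∈ pvTrueIdx a, i ∈ pvTrueIdx b) := by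
  simp only [mem_zip_iff, mem_trueIdx]
  constructor
  · rintro ⟨k, h1, h2⟩ hall
    obtain ⟨k', hk', hv⟩ := hall (k : Int) ⟨k, rfl, h1⟩
    rw [show k' = k by exact_mod_cast hk'.symm] at hv
    simp [hv] at h2
  · intro hnot
    rw [not_forall] at hnot
    obtain ⟨i, hi⟩ := hnot
    rw [Classical.not_imp] at hi
    obtain ⟨⟨k, rfl, hk⟩, hnb⟩ := hi
    refine ⟨k, hk, ?_⟩
    have hlt : k < b.length := h ▸ (List.getElem?_eq_some_iff.mp hk).1
    have : b[k]? ≠ some true := fun hc => hnb ⟨k, rfl, hc⟩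
    rw [List.getElem?_eq_getElem hlt] at this ⊢
    cases hb : b[k] with
    | true => exact absurd (by rw [hb]) this
    | false => rfl

theorem ft_iff (a b : List Bool) (h : a.length = b.length) :
    (false, true) ∈ a.zip b ↔ ¬ (∀ i ∈ pvTrueIdx b, i ∈ pvTrueIdx a) := by
  have := tf_iff b a h.symm
  rw [← this]
  constructor
  · rintro hm
    obtain ⟨k, h1, h2⟩ := (mem_zip_iff a b false true).mp hm
    exact (mem_zip_iff b a true false).mpr ⟨k, h2, h1⟩
  · rintro hm
    obtain ⟨k, h1, h2⟩ := (mem_zip_iff b a true false).mp hm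
    exact (mem_zip_iff a b false true).mpr ⟨k, h2, h1⟩

theorem check_overlapping_eq (a b : List Bool) (h : a.length = b.length) :
    check_overlapping a b = check_overlapping_alt a b := by
  unfold check_overlapping check_overlapping_alt
  simp only [fold_flags, Bool.false_or]
  have hempty : (PySem.Set.inter (pvTrueIdx a) (pvTrueIdx b)).isEmpty
      = !decide ((true, true) ∈ a.zip b) := by
    by_cases htt : (true, true) ∈ a.zip b
    · obtain ⟨i, h1, h2⟩ := (tt_iff a b).mp htt
      simp only [decide_eq_true htt, Bool.not_true]
      exact List.isEmpty_eq_false_iff_exists_mem.mpr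
        ⟨i, (PySem.Set.mem_inter _ _ _).mpr ⟨h1, h2⟩⟩
    · simp only [decide_eq_false htt, Bool.not_false]
      rw [List.isEmpty_iff, List.eq_nil_iff_forall_not_mem]
      intro i hi
      obtain ⟨h1, h2⟩ := (PySem.Set.mem_inter _ _ _).mp hi
      exact htt ((tt_iff a b).mpr ⟨i, h1, h2⟩)
  have hsub : PySem.Set.issubset (pvTrueIdx a) (pvTrueIdx b)
      = !decide ((true, false) ∈ a.zip b) := by
    by_cases htf : (true, false) ∈ a.zip b
    · simp only [decide_eq_true htf, Bool.not_true]
      rw [Bool.eq_false_iff]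
      intro hcontra
      exact (tf_iff a b h).mp htf ((PySem.Set.issubset_iff _ _).mp hcontra)
    · have hall := not_not.mp (fun hn => htf ((tf_iff a b h).mpr hn))
      simp [(PySem.Set.issubset_iff _ _).mpr hall, htf]
  have hsup : PySem.Set.issuperset (pvTrueIdx a) (pvTrueIdx b)
      = !decide ((false, true) ∈ a.zip b) := by
    by_cases hft : (false, true) ∈ a.zip b
    · simp only [decide_eq_true hft, Bool.not_true]
      rw [Bool.eq_false_iff]
      intro hcontra
      exact (ft_iff a b h).mp hft ((PySem.Set.issuperset_iff _ _).mp hcontra)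
    · have hall := not_not.mp (fun hn => hft ((ft_iff a b h).mpr hn))
      simp [(PySem.Set.issuperset_iff _ _).mpr hall, hft]
  have heq : PySem.Set.equal (pvTrueIdx a) (pvTrueIdx b)
      = (!decide ((true, false) ∈ a.zip b) && !decide ((false, true) ∈ a.zip b)) := by
    by_cases htf : (true, false) ∈ a.zip b
    · have h1 := (tf_iff a b h).mp htf
      have : PySem.Set.equal (pvTrueIdx a) (pvTrueIdx b) = false := by
        rw [Bool.eq_false_iff]
        intro hcontra
        exact h1 (fun x hx => ((PySem.Set.equal_iff _ _).mp hcontra x).mp hx)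
      simp [this, htf]
    · by_cases hft : (false, true) ∈ a.zip b
      · have h2 := (ft_iff a b h).mp hft
        have : PySem.Set.equal (pvTrueIdx a) (pvTrueIdx b) = false := by
          rw [Bool.eq_false_iff]
          intro hcontra
          exact h2 (fun x hx => ((PySem.Set.equal_iff _ _).mp hcontra x).mpr hx)
        simp [this, hft]
      · have h1 := not_not.mp (fun hn => htf ((tf_iff a b h).mpr hn))
        have h2 := not_not.mp (fun hn => hft ((ft_iff a b h).mpr hn))
        have : PySem.Set.equal (pvTrueIdx a) (pvTrueIdx b) = true :=
          (PySem.Set.equal_iff _ _).mpr (fun x => ⟨fun hx => h1 x hx, fun hx => h2 x hx⟩)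
        simp [this, htf, hft]
  rw [hempty, hsub, hsup, heq]
  by_cases htt : (true, true) ∈ a.zip b <;>
    by_cases htf : (true, false) ∈ a.zip b <;>
      by_cases hft : (false, true) ∈ a.zip b <;>
        simp [htt, htf, hft]

-- ===== VERDICT (by name: the statement is the Claim_ definition above) =====
theorem check_overlapping_spec : Claim_equal_check_overlapping := by
  intro a b _ hpre
  exact check_overlapping_eq a b hpre.1
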